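-- pv_equiv track=rewrite | github.com/Sullivan-24/PipelineSimulator | simulator/painter.py | generate_step_within_device
-- ===== SOURCE A (Python) =====
-- def generate_step_within_device(data:dict):
--     from collections import defaultdict
--     grouped = defaultdict(list)
--     for key, val in data.items():
--         did = key.split('_')[-1]
--         grouped[did].append((key, val))
--
--     data_step_idx = {}
--     for did, kv_list in grouped.items():
--         sorted_list = sorted(kv_list, key=lambda x: x[1])
--         for idx, (key, _) in enumerate(sorted_list):
--             data_step_idx[key] = idx
--     return data_step_idx
-- ===== SOURCE B (Python) =====
-- def generate_step_within_device(data: dict):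
--     # Single stable global sort by (first-seen device index, value), then one
--     # counting pass assigning each key its rank within its device.
--     first = {}
--     for key in data:
--         did = key.split('_')[-1]
--         if did not in first:
--             first[did] = len(first)
--     data_step_idx = {}
--     counts = {}
--     ordered = sorted(data.items(), key=lambda kv: (first[kv[0].split('_')[-1]], kv[1]))
--     for key, _val in ordered:
--         did = key.split('_')[-1]
--         c = counts.get(did, 0)
--         data_step_idx[key] = c
--         counts[did] = c + 1
--     return data_step_idx
-- ===== Notes on version B (the rewrite author's own statement) =====
-- stated objective: alternative
-- what changed: A groups items by device id and sorts each group separately, assigning indices per group; B performs one stable global sort of all items keyed by (first-seen device index, value) and then a single counting pass that assigns each key its running count for its device; Pre_ only requires the association list to have distinct keys, which every real Python dict argument satisfies.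
import Mathlib
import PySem

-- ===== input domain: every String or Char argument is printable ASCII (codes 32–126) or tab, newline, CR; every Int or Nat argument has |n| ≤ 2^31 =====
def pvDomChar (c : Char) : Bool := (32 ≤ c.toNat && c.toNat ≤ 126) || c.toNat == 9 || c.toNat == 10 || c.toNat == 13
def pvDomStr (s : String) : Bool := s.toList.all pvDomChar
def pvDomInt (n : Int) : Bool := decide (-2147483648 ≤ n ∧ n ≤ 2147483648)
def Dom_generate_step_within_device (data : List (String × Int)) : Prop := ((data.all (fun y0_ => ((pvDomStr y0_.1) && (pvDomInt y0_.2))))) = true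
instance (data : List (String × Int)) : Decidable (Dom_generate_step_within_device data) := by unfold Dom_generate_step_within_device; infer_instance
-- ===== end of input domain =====

-- B replaces A's group-by-device-then-sort-each-group by one stable global sort
-- keyed by (first-seen device index, value) followed by a single counting pass
-- (alternative decomposition, same asymptotic cost); equality is about the
-- returned dict rendered as its insertion-ordered association list.

-- shared helper: key.split('_')[-1], computed identically by both Pythons.
-- split? is some for the non-empty separator "_" and never returns an empty
-- list, so both getD defaults are unreachable.
def pvDid (k : String) : String :=
  match PySem.Str.split? k "_" with
  | some parts => (PySem.List.pyGet? parts (-1)).getD ""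
  | none => ""

-- ===== PORT A =====
def generate_step_within_device (data : List (String × Int)) : List (String × Int) :=
  let grouped : PySem.Dict String (List (String × Int)) :=
    data.foldl (fun g kv => g.modify (pvDid kv.1) [] (fun xs => xs ++ [kv])) PySem.Dict.empty
  let data_step_idx : PySem.Dict String Int :=
    grouped.items.foldl
      (fun acc p =>
        let sorted_list := PySem.List.sorted p.2 (fun x => x.2) false
        (PySem.List.enumerate sorted_list 0).foldl (fun acc q => acc.insert q.2.1 q.1) acc)
      PySem.Dict.empty
  data_step_idx.items

-- ===== PORT B =====
def generate_step_within_device_alt (data : List (String × Int)) : List (String × Int) :=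
  let first : PySem.Dict String Int :=
    data.foldl
      (fun f kv =>
        let d := pvDid kv.1
        if f.contains d then f else f.insert d (f.size : Int))
      PySem.Dict.empty
  -- first[did] in the Python sort key can never raise (every did was inserted
  -- above); getD's default 0 is unreachable.
  let ordered : List (String × Int) :=
    PySem.List.sorted2 data (fun kv => first.getD (pvDid kv.1) 0) (fun kv => kv.2) false
  let res : PySem.Dict String Int × PySem.Dict String Int :=
    ordered.foldl
      (fun st kv =>
        let d := pvDid kv.1
        let c := st.2.getD d 0
        (st.1.insert kv.1 c, st.2.insert d (c + 1)))
      (PySem.Dict.empty, PySem.Dict.empty)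
  res.1.items

-- ===== PRECONDITION & SPEC =====
-- Pre_ excludes association lists with duplicate keys: they do not encode any
-- Python dict (A's parameter is a dict, whose keys are necessarily distinct),
-- so no actual call of A is excluded.
def Pre_generate_step_within_device (data : List (String × Int)) : Prop :=
  (data.map Prod.fst).Nodup
instance (data : List (String × Int)) : Decidable (Pre_generate_step_within_device data) := by
  unfold Pre_generate_step_within_device; infer_instance

def pvWitness_generate_step_within_device : (List (String × Int)) :=
  [("a_0", 3), ("b_0", 1), ("c_1", 2)]

def Spec_generate_step_within_device (data : List (String × Int)) (out : List (String × Int)) : Prop := out = generate_step_within_device_alt data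
instance (data : List (String × Int)) (out : List (String × Int)) : Decidable (Spec_generate_step_within_device data out) := by unfold Spec_generate_step_within_device; infer_instance

-- ===== CLAIM (what is proved, stated in full; the proofs are below) =====
def Claim_equal_generate_step_within_device : Prop := ∀ (data : List (String × Int)), Dom_generate_step_within_device data → Pre_generate_step_within_device data → Spec_generate_step_within_device data (generate_step_within_device data)

-- ===== LEMMAS AND PROOFS =====

-- ---- shared abbreviations for the proofs ----
def pvGrp (l : List (String × Int)) (d : String) : List (String × Int) :=
  l.filter (fun kv => pvDid kv.1 == d)

def pvSortVal (l : List (String × Int)) : List (String × Int) :=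
  PySem.List.sorted l (fun kv => kv.2) false

def pvRank (s : List (String × Int)) : List (String × Int) :=
  (PySem.List.enumerate s 0).map (fun q => (q.2.1, q.1))

def pvDids (data : List (String × Int)) : List String :=
  PySem.Set.ofList (data.map (fun kv => pvDid kv.1))

def pvCanon (D : List String) (l : List (String × Int)) : List (String × Int) :=
  ((D.filter (fun d => decide (d ∈ l.map (fun kv => pvDid kv.1)))).map
    (fun d => pvSortVal (pvGrp l d))).flatten

def pvLex (K : String × Int → Int) (a b : String × Int) : Bool :=
  decide (K a < K b) || (!decide (K b < K a) && decide (a.2 < b.2))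

def pvBVal (a b : String × Int) : Bool := decide (a.2 < b.2)

def pvIdx : List String → String → Nat
  | [], _ => 0
  | e :: t, d => if e = d then 0 else pvIdx t d + 1

def pvFirstItems : List String → Nat → List (String × Int)
  | [], _ => []
  | d :: E, n => (d, (n : Int)) :: pvFirstItems E (n + 1)

def pvMkFirst (E : List String) : PySem.Dict String Int := ⟨pvFirstItems E 0⟩

-- ---- insertBy ----
theorem pv_insertBy_cons {α : Type} (b : α → α → Bool) (x y : α) (ys : List α) :
    PySem.List.insertBy b x (y :: ys) =
      if b x y then x :: y :: ys else y :: PySem.List.insertBy b x ys := rfl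

theorem pv_insertBy_all_true {α : Type} (b : α → α → Bool) (x : α) (as : List α)
    (h : ∀ y ∈ as, b x y = true) : PySem.List.insertBy b x as = x :: as := by
  cases as with
  | nil => rfl
  | cons y ys => rw [pv_insertBy_cons, h y (List.mem_cons_self ..), if_pos rfl]

theorem pv_insertBy_skip {α : Type} (b : α → α → Bool) (x : α) (as bs : List α)
    (h : ∀ y ∈ as, b x y = false) :
    PySem.List.insertBy b x (as ++ bs) = as ++ PySem.List.insertBy b x bs := by
  induction as with
  | nil => rfl
  | cons y ys ih =>
    rw [List.cons_append, pv_insertBy_cons, h y (List.mem_cons_self ..)]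
    simp only [Bool.false_eq_true, if_false, List.cons_append]
    rw [ih (fun z hz => h z (List.mem_cons_of_mem _ hz))]

theorem pv_insertBy_in {α : Type} (b : α → α → Bool) (x : α) (as bs : List α)
    (h : ∃ y ∈ as, b x y = true) :
    PySem.List.insertBy b x (as ++ bs) = PySem.List.insertBy b x as ++ bs := by
  induction as with
  | nil => simp at h
  | cons y ys ih =>
    by_cases hy : b x y = true
    · rw [List.cons_append, pv_insertBy_cons, hy, pv_insertBy_cons, hy]; simp
    · obtain ⟨z, hz, hbz⟩ := h
      rcases List.mem_cons.mp hz with rfl | hz'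
      · exact absurd hbz hy
      · rw [List.cons_append, pv_insertBy_cons, pv_insertBy_cons,
          Bool.eq_false_iff.mpr hy]
        simp only [Bool.false_eq_true, if_false, List.cons_append]
        rw [ih ⟨z, hz', hbz⟩]

theorem pv_insertBy_congr {α : Type} (b b' : α → α → Bool) (x : α) (as : List α)
    (h : ∀ y ∈ as, b x y = b' x y) :
    PySem.List.insertBy b x as = PySem.List.insertBy b' x as := by
  induction as with
  | nil => rfl
  | cons y ys ih =>
    rw [pv_insertBy_cons, pv_insertBy_cons, h y (List.mem_cons_self ..)]
    by_cases hy : b' x y = true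
    · rw [hy]; simp
    · rw [Bool.eq_false_iff.mpr hy]
      simp only [Bool.false_eq_true, if_false]
      rw [ih (fun z hz => h z (List.mem_cons_of_mem _ hz))]

-- ---- comparator facts ----
theorem pv_lex_lt (K : String × Int → Int) (x y : String × Int) (h : K y < K x) :
    pvLex K x y = false := by simp [pvLex]; omega

theorem pv_lex_gt (K : String × Int → Int) (x y : String × Int) (h : K x < K y) :
    pvLex K x y = true := by simp [pvLex]; omega

theorem pv_lex_eq (K : String × Int → Int) (x y : String × Int) (h : K x = K y) :
    pvLex K x y = pvBVal x y := by
  simp [pvLex, pvBVal, h]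

-- ---- sorted as a fold of insertions ----
theorem pv_sorted_append (l : List (String × Int)) (x : String × Int) :
    pvSortVal (l ++ [x]) = PySem.List.insertBy pvBVal x (pvSortVal l) := by
  unfold pvSortVal
  rw [PySem.List.sorted_eq_foldl_insertBy, PySem.List.sorted_eq_foldl_insertBy,
    List.foldl_append]
  rfl

theorem pv_sorted2_foldl (l : List (String × Int)) (K : String × Int → Int) :
    PySem.List.sorted2 l K (fun kv => kv.2) false =
      l.foldl (fun acc x => PySem.List.insertBy (pvLex K) x acc) [] := rfl

theorem pv_sortVal_singleton (x : String × Int) : pvSortVal [x] = [x] := rfl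

-- ---- pvIdx ----
theorem pv_pvIdx_cons_self (d : String) (t : List String) : pvIdx (d :: t) d = 0 := by
  simp [pvIdx]

theorem pv_pvIdx_append_not_mem (P rest : List String) (d : String) (h : d ∉ P) :
    pvIdx (P ++ rest) d = P.length + pvIdx rest d := by
  induction P with
  | nil => simp
  | cons e t ih =>
    have he : e ≠ d := fun hc => h (hc ▸ List.mem_cons_self ..)
    simp only [List.cons_append, pvIdx, if_neg he, List.length_cons]
    rw [ih (fun hc => h (List.mem_cons_of_mem _ hc))]
    omega

theorem pv_pvIdx_append_of_mem (P rest : List String) (d : String) (h : d ∈ P) :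
    pvIdx (P ++ rest) d = pvIdx P d := by
  induction P with
  | nil => simp at h
  | cons e t ih =>
    by_cases he : e = d
    · simp [pvIdx, he]
    · rcases List.mem_cons.mp h with rfl | ht
      · exact absurd rfl he
      · simp only [List.cons_append, pvIdx, if_neg he]
        rw [ih ht]

theorem pv_pvIdx_lt_length (P : List String) (d : String) (h : d ∈ P) :
    pvIdx P d < P.length := by
  induction P with
  | nil => simp at h
  | cons e t ih =>
    by_cases he : e = d
    · simp [pvIdx, he]
    · rcases List.mem_cons.mp h with rfl | ht
      · exact absurd rfl he
      · simp only [pvIdx, if_neg he, List.length_cons]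
        exact Nat.succ_lt_succ (ih ht)

-- ---- membership through blocks ----
theorem pv_mem_block (l : List (String × Int)) (d : String) (y : String × Int)
    (h : y ∈ pvSortVal (pvGrp l d)) : y ∈ l ∧ pvDid y.1 = d := by
  have hy := (PySem.List.mem_sorted _ _ _ _).mp h
  have := List.mem_filter.mp hy
  exact ⟨this.1, by simpa using this.2⟩

-- ---- the global-sort lemma: stable sort by (device index, value) is the
-- ---- concatenation, in device order, of the per-device stable sorts by value
theorem pv_sorted2_canon (D : List String) (K : String × Int → Int) (hD : D.Nodup) :
    ∀ (l : List (String × Int)),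
      (∀ x ∈ l, pvDid x.1 ∈ D) →
      (∀ x ∈ l, K x = (pvIdx D (pvDid x.1) : Int)) →
      PySem.List.sorted2 l K (fun kv => kv.2) false = pvCanon D l := by
  intro l
  induction l using List.reverseRecOn with
  | nil =>
    intro _ _
    simp [pvCanon, pv_sorted2_foldl]
  | append_singleton l x ih =>
    intro hmem hK
    have hmem' : ∀ z ∈ l, pvDid z.1 ∈ D := fun z hz => hmem z (List.mem_append_left _ hz)
    have hK' : ∀ z ∈ l, K z = (pvIdx D (pvDid z.1) : Int) := fun z hz => hK z (List.mem_append_left _ hz)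
    have hxD : pvDid x.1 ∈ D := hmem x (List.mem_append_right _ (List.mem_singleton.mpr rfl))
    have hKx : K x = (pvIdx D (pvDid x.1) : Int) := hK x (List.mem_append_right _ (List.mem_singleton.mpr rfl))
    rw [pv_sorted2_foldl, List.foldl_append, ← pv_sorted2_foldl, ih hmem' hK']
    simp only [List.foldl_cons, List.foldl_nil]
    -- split D at the device of x
    obtain ⟨P, S, hDsplit⟩ := List.append_of_mem hxD
    have hnd' : (P ++ pvDid x.1 :: S).Nodup := hDsplit ▸ hD
    have hdP : pvDid x.1 ∉ P := fun hc =>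
      (List.nodup_append.mp hnd').2.2 _ hc _ (List.mem_cons_self ..) rfl
    have hdS : pvDid x.1 ∉ S := (List.nodup_cons.mp (List.nodup_append.mp hnd').2.1).1
    have hdisj : ∀ a ∈ P, a ∉ (pvDid x.1 :: S) := fun a ha hmem2 =>
      (List.nodup_append.mp hnd').2.2 a ha a hmem2 rfl
    have hidx : pvIdx D (pvDid x.1) = P.length := by
      rw [hDsplit, pv_pvIdx_append_not_mem P _ _ hdP, pv_pvIdx_cons_self]
      omega
    have hKxv : K x = (P.length : Int) := by rw [hKx, hidx]
    -- comparator values on earlier / equal / later device blocks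
    have hKP : ∀ d' ∈ P, ∀ y ∈ pvSortVal (pvGrp l d'), pvLex K x y = false := by
      intro d' hd' y hy
      obtain ⟨hyl, hyd⟩ := pv_mem_block l d' y hy
      have hKy : K y = (pvIdx D d' : Int) := by rw [hK' y hyl, hyd]
      apply pv_lex_lt
      have h1 : pvIdx D d' < P.length := by
        rw [hDsplit, pv_pvIdx_append_of_mem P _ d' hd']
        exact pv_pvIdx_lt_length P d' hd'
      rw [hKy, hKxv]
      exact_mod_cast h1
    have hKS : ∀ d' ∈ S, ∀ y ∈ pvSortVal (pvGrp l d'), pvLex K x y = true := by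
      intro d' hd' y hy
      obtain ⟨hyl, hyd⟩ := pv_mem_block l d' y hy
      have hKy : K y = (pvIdx D d' : Int) := by rw [hK' y hyl, hyd]
      apply pv_lex_gt
      have hd'd : d' ≠ pvDid x.1 := fun hc : d' = pvDid x.1 => hdS (hc ▸ hd')
      have hd'P : d' ∉ P := fun hc => hdisj d' hc (List.mem_cons_of_mem _ hd')
      have hcons : pvIdx (pvDid x.1 :: S) d' = pvIdx S d' + 1 := by
        simp only [pvIdx, if_neg (show ¬ pvDid x.1 = d' from fun hc => hd'd hc.symm)]
      have h1 : pvIdx D d' = P.length + (pvIdx S d' + 1) := by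
        rw [hDsplit, pv_pvIdx_append_not_mem P _ d' hd'P, hcons]
      rw [hKy, hKxv, h1]
      push_cast
      omega
    have hKd : ∀ y ∈ pvSortVal (pvGrp l (pvDid x.1)), pvLex K x y = pvBVal x y := by
      intro y hy
      obtain ⟨hyl, hyd⟩ := pv_mem_block l (pvDid x.1) y hy
      apply pv_lex_eq
      rw [hKxv, hK' y hyl, hyd, hidx]
    -- effect of appending x on the device list and on the groups
    have hmapx : (l ++ [x]).map (fun kv => pvDid kv.1)
        = l.map (fun kv => pvDid kv.1) ++ [pvDid x.1] := by
      simp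
    have hgrpP : ∀ d' : String, d' ≠ pvDid x.1 → pvGrp (l ++ [x]) d' = pvGrp l d' := by
      intro d' hne
      unfold pvGrp
      rw [List.filter_append]
      have hnil : List.filter (fun kv => pvDid kv.1 == d') [x] = [] := by
        simp only [List.filter_cons, List.filter_nil, beq_iff_eq]
        rw [if_neg (show ¬ pvDid x.1 = d' from fun hc => hne hc.symm)]
      rw [hnil, List.append_nil]
    have hgrpd : pvGrp (l ++ [x]) (pvDid x.1) = pvGrp l (pvDid x.1) ++ [x] := by
      unfold pvGrp
      rw [List.filter_append]
      congr 1
      simp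
    have hfilP :
        P.filter (fun d' => decide (d' ∈ (l ++ [x]).map (fun kv => pvDid kv.1)))
          = P.filter (fun d' => decide (d' ∈ l.map (fun kv => pvDid kv.1))) := by
      refine List.filter_congr (fun d' hd' => ?_)
      have hne : d' ≠ pvDid x.1 := fun hc => hdisj d' hd' (hc ▸ List.mem_cons_self ..)
      rw [decide_eq_decide, hmapx]
      simp [hne]
    have hfilS :
        S.filter (fun d' => decide (d' ∈ (l ++ [x]).map (fun kv => pvDid kv.1)))
          = S.filter (fun d' => decide (d' ∈ l.map (fun kv => pvDid kv.1))) := by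
      refine List.filter_congr (fun d' hd' => ?_)
      have hne : d' ≠ pvDid x.1 := fun hc => hdS (hc ▸ hd')
      rw [decide_eq_decide, hmapx]
      simp [hne]
    have hmapP :
        (P.filter (fun d' => decide (d' ∈ l.map (fun kv => pvDid kv.1)))).map
            (fun d' => pvSortVal (pvGrp (l ++ [x]) d'))
          = (P.filter (fun d' => decide (d' ∈ l.map (fun kv => pvDid kv.1)))).map
            (fun d' => pvSortVal (pvGrp l d')) := by
      refine List.map_congr_left (fun d' hd' => ?_)
      have hne : d' ≠ pvDid x.1 := fun hc =>
        hdisj d' (List.mem_filter.mp hd').1 (hc ▸ List.mem_cons_self ..)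
      rw [hgrpP d' hne]
    have hmapS :
        (S.filter (fun d' => decide (d' ∈ l.map (fun kv => pvDid kv.1)))).map
            (fun d' => pvSortVal (pvGrp (l ++ [x]) d'))
          = (S.filter (fun d' => decide (d' ∈ l.map (fun kv => pvDid kv.1)))).map
            (fun d' => pvSortVal (pvGrp l d')) := by
      refine List.map_congr_left (fun d' hd' => ?_)
      have hne : d' ≠ pvDid x.1 := fun hc => hdS (hc ▸ (List.mem_filter.mp hd').1)
      rw [hgrpP d' hne]
    have hpredx : (decide (pvDid x.1 ∈ (l ++ [x]).map (fun kv => pvDid kv.1)) : Bool) = true := by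
      rw [hmapx]; simp
    by_cases hm : pvDid x.1 ∈ l.map (fun kv => pvDid kv.1)
    · -- the device of x already occurs in l
      have hLHS : pvCanon D l =
          ((P.filter (fun d' => decide (d' ∈ l.map (fun kv => pvDid kv.1)))).map
              (fun d' => pvSortVal (pvGrp l d'))).flatten
            ++ (pvSortVal (pvGrp l (pvDid x.1))
            ++ ((S.filter (fun d' => decide (d' ∈ l.map (fun kv => pvDid kv.1)))).map
              (fun d' => pvSortVal (pvGrp l d'))).flatten) := by
        unfold pvCanon
        rw [hDsplit, List.filter_append, List.filter_cons, if_pos (by simpa using hm)]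
        simp [List.map_append, List.flatten_append]
      have hRHS : pvCanon D (l ++ [x]) =
          ((P.filter (fun d' => decide (d' ∈ l.map (fun kv => pvDid kv.1)))).map
              (fun d' => pvSortVal (pvGrp l d'))).flatten
            ++ (pvSortVal (pvGrp l (pvDid x.1) ++ [x])
            ++ ((S.filter (fun d' => decide (d' ∈ l.map (fun kv => pvDid kv.1)))).map
              (fun d' => pvSortVal (pvGrp l d'))).flatten) := by
        unfold pvCanon
        rw [hDsplit, List.filter_append, List.filter_cons, if_pos hpredx, hfilP, hfilS]
        simp only [List.map_append, List.map_cons, List.flatten_append, List.flatten_cons]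
        rw [hmapP, hmapS, hgrpd]
      rw [hLHS, hRHS, pv_sorted_append]
      rw [pv_insertBy_skip _ _ _ _ (fun y hy => by
        obtain ⟨bl, hbl, hybl⟩ := List.mem_flatten.mp hy
        obtain ⟨d', hd', rfl⟩ := List.mem_map.mp hbl
        exact hKP d' (List.mem_filter.mp hd').1 y hybl)]
      congr 1
      have hFS_true : ∀ y ∈ ((S.filter (fun d' => decide (d' ∈ l.map (fun kv => pvDid kv.1)))).map
          (fun d' => pvSortVal (pvGrp l d'))).flatten, pvLex K x y = true := by
        intro y hy
        obtain ⟨bl, hbl, hybl⟩ := List.mem_flatten.mp hy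
        obtain ⟨d', hd', rfl⟩ := List.mem_map.mp hbl
        exact hKS d' (List.mem_filter.mp hd').1 y hybl
      by_cases hex : ∃ y ∈ pvSortVal (pvGrp l (pvDid x.1)), pvBVal x y = true
      · obtain ⟨y0, hy0, hby0⟩ := hex
        rw [pv_insertBy_in _ _ _ _ ⟨y0, hy0, by rw [hKd y0 hy0]; exact hby0⟩]
        rw [pv_insertBy_congr _ pvBVal _ _ hKd]
      · push Not at hex
        have hall : ∀ y ∈ pvSortVal (pvGrp l (pvDid x.1)), pvBVal x y = false :=
          fun y hy => Bool.eq_false_iff.mpr (hex y hy)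
        rw [pv_insertBy_skip _ _ _ _ (fun y hy => by rw [hKd y hy]; exact hall y hy),
          pv_insertBy_all_true _ _ _ hFS_true,
          PySem.List.insertBy_of_forall_not_before _ _ _ hall]
        simp
    · -- new device: x forms a fresh singleton block between the P- and S-blocks
      have hgrpnil : pvGrp l (pvDid x.1) = [] := by
        apply List.filter_eq_nil_iff.mpr
        intro kv hkv
        simp only [beq_iff_eq]
        intro hc
        exact hm (List.mem_map.mpr ⟨kv, hkv, hc⟩)
      have hLHS : pvCanon D l =
          ((P.filter (fun d' => decide (d' ∈ l.map (fun kv => pvDid kv.1)))).map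
              (fun d' => pvSortVal (pvGrp l d'))).flatten
            ++ ((S.filter (fun d' => decide (d' ∈ l.map (fun kv => pvDid kv.1)))).map
              (fun d' => pvSortVal (pvGrp l d'))).flatten := by
        unfold pvCanon
        rw [hDsplit, List.filter_append, List.filter_cons, if_neg (by simpa using hm)]
        simp [List.map_append, List.flatten_append]
      have hRHS : pvCanon D (l ++ [x]) =
          ((P.filter (fun d' => decide (d' ∈ l.map (fun kv => pvDid kv.1)))).map
              (fun d' => pvSortVal (pvGrp l d'))).flatten
            ++ (x
            :: ((S.filter (fun d' => decide (d' ∈ l.map (fun kv => pvDid kv.1)))).map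
              (fun d' => pvSortVal (pvGrp l d'))).flatten) := by
        unfold pvCanon
        rw [hDsplit, List.filter_append, List.filter_cons, if_pos hpredx, hfilP, hfilS]
        simp only [List.map_append, List.map_cons, List.flatten_append, List.flatten_cons]
        rw [hmapP, hmapS, hgrpd, hgrpnil]
        simp [pv_sortVal_singleton]
      rw [hLHS, hRHS]
      rw [pv_insertBy_skip _ _ _ _ (fun y hy => by
        obtain ⟨bl, hbl, hybl⟩ := List.mem_flatten.mp hy
        obtain ⟨d', hd', rfl⟩ := List.mem_map.mp hbl
        exact hKP d' (List.mem_filter.mp hd').1 y hybl)]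
      congr 1
      exact pv_insertBy_all_true _ _ _ (fun y hy => by
        obtain ⟨bl, hbl, hybl⟩ := List.mem_flatten.mp hy
        obtain ⟨d', hd', rfl⟩ := List.mem_map.mp hbl
        exact hKS d' (List.mem_filter.mp hd').1 y hybl)

-- ---- the `first` dictionary is the device → first-seen-index table ----
theorem pv_firstItems_append (E : List String) (d : String) :
    ∀ n, pvFirstItems (E ++ [d]) n = pvFirstItems E n ++ [(d, ((n + E.length : Nat) : Int))] := by
  induction E with
  | nil => intro n; simp [pvFirstItems]
  | cons e t ih =>
    intro n
    simp only [List.cons_append, pvFirstItems, ih (n + 1), List.length_cons]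
    have h : n + 1 + t.length = n + (t.length + 1) := by omega
    rw [h]

theorem pv_firstItems_fst (E : List String) : ∀ n, (pvFirstItems E n).map Prod.fst = E := by
  induction E with
  | nil => intro n; rfl
  | cons e t ih => intro n; simp [pvFirstItems, ih]

theorem pv_any_key {ν : Type} (k : String) :
    ∀ (items : List (String × ν)), (items.any fun p => p.1 == k) = decide (k ∈ items.map Prod.fst) := by
  intro items
  induction items with
  | nil => simp
  | cons p t ih =>
    by_cases hpk : p.1 = k
    · simp [hpk]
    · have hkp : ¬ k = p.1 := fun h => hpk h.symm
      have h1 : (p.1 == k) = false := by simpa using hpk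
      simp [h1, hkp, ih, List.mem_cons]

theorem pv_contains_eq {ν : Type} (d : PySem.Dict String ν) (k : String) :
    d.contains k = decide (k ∈ d.items.map Prod.fst) := by
  cases d with
  | mk items => exact pv_any_key k items

theorem pv_contains_mkFirst (E : List String) (k : String) :
    (pvMkFirst E).contains k = decide (k ∈ E) := by
  rw [pv_contains_eq]
  simp [pvMkFirst, pv_firstItems_fst]

theorem pv_firstItems_length (E : List String) : ∀ n, (pvFirstItems E n).length = E.length := by
  induction E with
  | nil => intro n; rfl
  | cons e t ih => intro n; simp [pvFirstItems, ih]

theorem pv_first_fold (l : List (String × Int)) :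
    ∀ (E : List String),
      l.foldl
        (fun f kv =>
          let d := pvDid kv.1
          if f.contains d then f else f.insert d (f.size : Int))
        (pvMkFirst E)
      = pvMkFirst (PySem.Set.update E (l.map (fun kv => pvDid kv.1))) := by
  induction l with
  | nil => intro E; rfl
  | cons kv t ih =>
    intro E
    simp only [List.foldl_cons, List.map_cons, PySem.Set.update, List.foldl_cons]
    by_cases hc : pvDid kv.1 ∈ E
    · have h1 : (pvMkFirst E).contains (pvDid kv.1) = true := by
        rw [pv_contains_mkFirst]; simpa
      have h2 : PySem.Set.add E (pvDid kv.1) = E := by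
        unfold PySem.Set.add
        rw [if_pos (by simpa using hc)]
      rw [if_pos h1, h2]
      exact ih E
    · have h1 : (pvMkFirst E).contains (pvDid kv.1) = false := by
        rw [pv_contains_mkFirst]; simpa
      have h2 : PySem.Set.add E (pvDid kv.1) = E ++ [pvDid kv.1] := by
        unfold PySem.Set.add
        rw [if_neg (by simpa using hc)]
      have h3 : (pvMkFirst E).insert (pvDid kv.1) ((pvMkFirst E).size : Int)
          = pvMkFirst (E ++ [pvDid kv.1]) := by
        apply PySem.Dict.ext
        rw [PySem.Dict.items_insert_of_not_contains _ _ h1]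
        simp only [pvMkFirst]
        rw [pv_firstItems_append]
        simp [PySem.Dict.size, pv_firstItems_length]
      rw [if_neg (by rw [h1]; exact Bool.false_ne_true)]
      rw [h3, h2]
      exact ih (E ++ [pvDid kv.1])

theorem pv_get_mkFirstAux (d : String) :
    ∀ (D : List String) (n : Nat), D.Nodup → d ∈ D →
      (List.find? (fun p => p.1 == d) (pvFirstItems D n)).map (fun p => p.2)
        = some (((n + pvIdx D d : Nat) : Int)) := by
  intro D
  induction D with
  | nil => intro n _ h; simp at h
  | cons e t ih =>
    intro n hnd hmem
    by_cases he : e = d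
    · subst he
      simp [pvFirstItems, pvIdx]
    · have hdt : d ∈ t := by
        rcases List.mem_cons.mp hmem with h | h
        · exact absurd h.symm he
        · exact h
      have : (e == d) = false := by simpa using he
      simp only [pvFirstItems, List.find?, this]
      rw [ih (n + 1) (List.nodup_cons.mp hnd).2 hdt]
      simp only [pvIdx, if_neg he]
      congr 1
      omega

theorem pv_getD_mkFirst (D : List String) (d : String) (hnd : D.Nodup) (hmem : d ∈ D) :
    (pvMkFirst D).getD d 0 = (pvIdx D d : Int) := by
  have h := pv_get_mkFirstAux d D 0 hnd hmem
  simp only [pvMkFirst, PySem.Dict.getD, PySem.Dict.get?]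
  rw [h]
  simp

-- ---- A's grouped dictionary ----
theorem pv_grouped_getD (data : List (String × Int)) (c : String) :
    (data.foldl (fun g kv => g.modify (pvDid kv.1) [] (fun xs => xs ++ [kv])) PySem.Dict.empty).getD c []
      = pvGrp data c := by
  have hmap : data.foldl (fun g kv => g.modify (pvDid kv.1) [] (fun xs => xs ++ [kv])) PySem.Dict.empty
      = (data.map (fun kv => (pvDid kv.1, kv))).foldl
          (fun g p => g.modify p.1 [] (fun xs => xs ++ [p.2])) PySem.Dict.empty := by
    rw [List.foldl_map]
  rw [hmap, PySem.Dict.getD_foldl_modify_append]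
  rw [List.filter_map]
  simp [pvGrp, Function.comp_def]

theorem pv_grouped_keys (data : List (String × Int)) :
    (data.foldl (fun g kv => g.modify (pvDid kv.1) [] (fun xs => xs ++ [kv])) PySem.Dict.empty).keys
      = pvDids data := by
  rw [PySem.Dict.keys_foldl_modify_key data (fun kv => pvDid kv.1) []
    (fun g kv => (fun xs => xs ++ [kv])) PySem.Dict.empty]
  simp [pvDids, PySem.Set.update, PySem.Set.ofList_eq_foldl, List.foldl_map,
    PySem.Dict.empty, PySem.Dict.keys]

theorem pv_grouped_items (data : List (String × Int)) :
    (data.foldl (fun g kv => g.modify (pvDid kv.1) [] (fun xs => xs ++ [kv])) PySem.Dict.empty).items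
      = (pvDids data).map (fun d => (d, pvGrp data d)) := by
  have hnd : (data.foldl (fun g kv => g.modify (pvDid kv.1) [] (fun xs => xs ++ [kv])) PySem.Dict.empty).keys.Nodup := by
    rw [pv_grouped_keys]
    exact PySem.Set.nodup_ofList _
  rw [PySem.Dict.items_eq_map_keys _ hnd []]
  rw [pv_grouped_keys]
  apply List.map_congr_left
  intro d _
  rw [pv_grouped_getD]

-- ---- freshness helper facts ----
theorem pv_rank_keys (s : List (String × Int)) :
    (pvRank s).map Prod.fst = s.map Prod.fst := by
  unfold pvRank
  rw [List.map_map]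
  have h1 : ((PySem.List.enumerate s 0).map (Prod.fst ∘ fun q => (q.2.1, q.1)))
      = ((PySem.List.enumerate s 0).map (·.2)).map Prod.fst := by
    rw [List.map_map]; rfl
  rw [h1, PySem.List.map_snd_enumerate]

-- ---- A's output loop ----
theorem pv_A_outer (grp : String → List (String × Int)) :
    ∀ (ds : List String) (r : PySem.Dict String Int),
      ds.Nodup →
      (∀ d ∈ ds, ∀ kv ∈ grp d, pvDid kv.1 = d) →
      (∀ d ∈ ds, ((grp d).map Prod.fst).Nodup) →
      (∀ d ∈ ds, ∀ kv ∈ grp d, r.contains kv.1 = false) →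
      ((ds.map (fun d => (d, grp d))).foldl
        (fun acc p =>
          (PySem.List.enumerate (PySem.List.sorted p.2 (fun x => x.2) false) 0).foldl
            (fun acc q => acc.insert q.2.1 q.1) acc)
        r).items
      = r.items ++ (ds.map (fun d => pvRank (pvSortVal (grp d)))).flatten := by
  intro ds
  induction ds with
  | nil => intro r _ _ _ _; simp
  | cons d ds' ih =>
    intro r hnd hdid hknd hfresh
    simp only [List.map_cons, List.foldl_cons, List.flatten_cons]
    have hmemblock : ∀ q ∈ PySem.List.enumerate (pvSortVal (grp d)) 0, q.2 ∈ grp d := by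
      intro q hq
      obtain ⟨k, hk, rfl⟩ := (PySem.List.mem_enumerate_iff _ _ _).mp hq
      exact ((PySem.List.mem_sorted _ _ _ _).mp (List.getElem_mem hk))
    have hfreshin : ∀ q ∈ PySem.List.enumerate (pvSortVal (grp d)) 0,
        r.contains q.2.1 = false := fun q hq =>
      hfresh d (List.mem_cons_self ..) q.2 (hmemblock q hq)
    have hndin : ((PySem.List.enumerate (pvSortVal (grp d)) 0).map (fun q => q.2.1)).Nodup := by
      have h1 : ((PySem.List.enumerate (pvSortVal (grp d)) 0).map (fun q => q.2.1))
          = ((PySem.List.enumerate (pvSortVal (grp d)) 0).map (·.2)).map Prod.fst := by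
        rw [List.map_map]; rfl
      rw [h1, PySem.List.map_snd_enumerate]
      have hperm : (pvSortVal (grp d)).Perm (grp d) := PySem.List.sorted_perm _ _ _
      exact ((hperm.map Prod.fst).nodup_iff).mpr (hknd d (List.mem_cons_self ..))
    have hinner := PySem.Dict.items_foldl_insert_fresh
      (PySem.List.enumerate (pvSortVal (grp d)) 0) (fun q => q.2.1) (fun q => q.1) r
      hfreshin hndin
    set r' := (PySem.List.enumerate (pvSortVal (grp d)) 0).foldl
      (fun acc q => acc.insert q.2.1 q.1) r with hr'
    have hr'items : r'.items = r.items ++ pvRank (pvSortVal (grp d)) := by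
      rw [hr', hinner]; rfl
    have hfresh' : ∀ d' ∈ ds', ∀ kv ∈ grp d', r'.contains kv.1 = false := by
      intro d' hd' kv hkv
      rw [pv_contains_eq, hr'items]
      simp only [List.map_append, List.mem_append, decide_eq_false_iff_not]
      rintro (hin | hin)
      · have := hfresh d' (List.mem_cons_of_mem _ hd') kv hkv
        rw [pv_contains_eq] at this
        exact (decide_eq_false_iff_not.mp this) hin
      · rw [pv_rank_keys] at hin
        obtain ⟨kv₀, hkv₀, hkey⟩ := List.mem_map.mp hin
        have hkv₀' := (PySem.List.mem_sorted _ _ _ _).mp hkv₀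
        have h1 : pvDid kv₀.1 = d := hdid d (List.mem_cons_self ..) kv₀ hkv₀'
        have h2 : pvDid kv.1 = d' := hdid d' (List.mem_cons_of_mem _ hd') kv hkv
        have : d' = d := by rw [← h2, ← h1, hkey]
        exact (List.nodup_cons.mp hnd).1 (this ▸ hd')
    have := ih r' (List.nodup_cons.mp hnd).2
      (fun d' hd' => hdid d' (List.mem_cons_of_mem _ hd'))
      (fun d' hd' => hknd d' (List.mem_cons_of_mem _ hd'))
      hfresh'
    -- align the inner sorted expression with pvSortVal
    show ((ds'.map (fun d => (d, grp d))).foldl _ r').items = _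
    rw [this, hr'items, List.append_assoc]

-- ---- B's counting loop ----
theorem pv_B_block (d : String) :
    ∀ (b : List (String × Int)) (r c : PySem.Dict String Int) (n : Int),
      (∀ kv ∈ b, pvDid kv.1 = d) →
      ((b.map Prod.fst).Nodup) →
      (∀ kv ∈ b, r.contains kv.1 = false) →
      c.getD d 0 = n →
      (b.foldl
        (fun st kv =>
          ((st.1.insert kv.1 (st.2.getD (pvDid kv.1) 0) : PySem.Dict String Int),
           (st.2.insert (pvDid kv.1) (st.2.getD (pvDid kv.1) 0 + 1) : PySem.Dict String Int)))
        (r, c)).1.items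
        = r.items ++ (PySem.List.enumerate b n).map (fun q => (q.2.1, q.1))
      ∧ ∀ d', d' ≠ d →
          ((b.foldl
            (fun st kv =>
              ((st.1.insert kv.1 (st.2.getD (pvDid kv.1) 0) : PySem.Dict String Int),
               (st.2.insert (pvDid kv.1) (st.2.getD (pvDid kv.1) 0 + 1) : PySem.Dict String Int)))
            (r, c)).2.getD d' 0 = c.getD d' 0
          ∧ (b.foldl
            (fun st kv =>
              ((st.1.insert kv.1 (st.2.getD (pvDid kv.1) 0) : PySem.Dict String Int),
               (st.2.insert (pvDid kv.1) (st.2.getD (pvDid kv.1) 0 + 1) : PySem.Dict String Int)))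
            (r, c)).2.contains d' = c.contains d') := by
  intro b
  induction b with
  | nil => intro r c n _ _ _ _; simp
  | cons kv t ih =>
    intro r c n hdid hnd hfresh hcd
    have hkvd : pvDid kv.1 = d := hdid kv (List.mem_cons_self ..)
    simp only [List.foldl_cons, hkvd, hcd]
    have hfresh_head : r.contains kv.1 = false := hfresh kv (List.mem_cons_self ..)
    have hr' : (r.insert kv.1 n).items = r.items ++ [(kv.1, n)] :=
      PySem.Dict.items_insert_of_not_contains r n hfresh_head
    have hfresh' : ∀ kv' ∈ t, (r.insert kv.1 n).contains kv'.1 = false := by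
      intro kv' hkv'
      rw [PySem.Dict.contains_insert]
      have h1 : kv'.1 ≠ kv.1 := by
        intro hc
        have := (List.nodup_cons.mp hnd).1
        exact this (hc ▸ List.mem_map.mpr ⟨kv', hkv', rfl⟩)
      simp [h1, hfresh kv' (List.mem_cons_of_mem _ hkv')]
    have hcd' : (c.insert d (n + 1)).getD d 0 = n + 1 :=
      PySem.Dict.getD_insert_self c d (n + 1) 0
    obtain ⟨hitems, hcounts⟩ := ih (r.insert kv.1 n) (c.insert d (n + 1)) (n + 1)
      (fun kv' h => hdid kv' (List.mem_cons_of_mem _ h))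
      (List.nodup_cons.mp hnd).2 hfresh' hcd'
    constructor
    · rw [hitems, hr']
      have henum : PySem.List.enumerate (kv :: t) n = (n, kv) :: PySem.List.enumerate t (n + 1) := rfl
      rw [henum]
      simp
    · intro d' hd'
      obtain ⟨h1, h2⟩ := hcounts d' hd'
      refine ⟨?_, ?_⟩
      · rw [h1, PySem.Dict.getD_insert_of_ne _ _ _ hd']
      · rw [h2, PySem.Dict.contains_insert]
        simp [hd']

theorem pv_B_outer (grp : String → List (String × Int)) :
    ∀ (ds : List String) (r c : PySem.Dict String Int),
      ds.Nodup →
      (∀ d ∈ ds, ∀ kv ∈ grp d, pvDid kv.1 = d) →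
      (∀ d ∈ ds, ((grp d).map Prod.fst).Nodup) →
      (∀ d ∈ ds, ∀ kv ∈ grp d, r.contains kv.1 = false) →
      (∀ d ∈ ds, c.contains d = false) →
      (((ds.map (fun d => pvSortVal (grp d))).flatten).foldl
        (fun st kv =>
          ((st.1.insert kv.1 (st.2.getD (pvDid kv.1) 0) : PySem.Dict String Int),
           (st.2.insert (pvDid kv.1) (st.2.getD (pvDid kv.1) 0 + 1) : PySem.Dict String Int)))
        (r, c)).1.items
      = r.items ++ (ds.map (fun d => pvRank (pvSortVal (grp d)))).flatten := by
  intro ds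
  induction ds with
  | nil => intro r c _ _ _ _ _; simp
  | cons d ds' ih =>
    intro r c hnd hdid hknd hfresh hcfresh
    simp only [List.map_cons, List.flatten_cons, List.foldl_append]
    have hbd : ∀ kv ∈ pvSortVal (grp d), pvDid kv.1 = d := by
      intro kv hkv
      exact hdid d (List.mem_cons_self ..) kv ((PySem.List.mem_sorted _ _ _ _).mp hkv)
    have hbnd : ((pvSortVal (grp d)).map Prod.fst).Nodup := by
      have hperm : (pvSortVal (grp d)).Perm (grp d) := PySem.List.sorted_perm _ _ _
      exact ((hperm.map Prod.fst).nodup_iff).mpr (hknd d (List.mem_cons_self ..))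
    have hbfresh : ∀ kv ∈ pvSortVal (grp d), r.contains kv.1 = false := by
      intro kv hkv
      exact hfresh d (List.mem_cons_self ..) kv ((PySem.List.mem_sorted _ _ _ _).mp hkv)
    have hc0 : c.getD d 0 = 0 :=
      PySem.Dict.getD_of_not_contains c 0 (hcfresh d (List.mem_cons_self ..))
    obtain ⟨hitems, hcounts⟩ := pv_B_block d (pvSortVal (grp d)) r c 0 hbd hbnd hbfresh hc0
    set st := ((pvSortVal (grp d)).foldl
        (fun st kv =>
          ((st.1.insert kv.1 (st.2.getD (pvDid kv.1) 0) : PySem.Dict String Int),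
           (st.2.insert (pvDid kv.1) (st.2.getD (pvDid kv.1) 0 + 1) : PySem.Dict String Int)))
        (r, c)) with hst
    have hstpair : st = (st.1, st.2) := rfl
    have hfresh' : ∀ d' ∈ ds', ∀ kv ∈ grp d', st.1.contains kv.1 = false := by
      intro d' hd' kv hkv
      rw [pv_contains_eq, hitems]
      simp only [List.map_append, List.mem_append, decide_eq_false_iff_not]
      rintro (hin | hin)
      · have := hfresh d' (List.mem_cons_of_mem _ hd') kv hkv
        rw [pv_contains_eq] at this
        exact (decide_eq_false_iff_not.mp this) hin
      · have hin' : kv.1 ∈ (pvSortVal (grp d)).map Prod.fst := by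
          have h1 : ((PySem.List.enumerate (pvSortVal (grp d)) 0).map (fun q => (q.2.1, q.1))).map Prod.fst
              = (pvSortVal (grp d)).map Prod.fst := pv_rank_keys _
          rw [← h1]
          exact hin
        obtain ⟨kv₀, hkv₀, hkey⟩ := List.mem_map.mp hin'
        have h1 : pvDid kv₀.1 = d := hbd kv₀ hkv₀
        have h2 : pvDid kv.1 = d' := hdid d' (List.mem_cons_of_mem _ hd') kv hkv
        have : d' = d := by rw [← h2, ← h1, hkey]
        exact (List.nodup_cons.mp hnd).1 (this ▸ hd')
    have hcfresh' : ∀ d' ∈ ds', st.2.contains d' = false := by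
      intro d' hd'
      have hne : d' ≠ d := by
        intro hc
        exact (List.nodup_cons.mp hnd).1 (hc ▸ hd')
      rw [(hcounts d' hne).2]
      exact hcfresh d' (List.mem_cons_of_mem _ hd')
    have := ih st.1 st.2 (List.nodup_cons.mp hnd).2
      (fun d' hd' => hdid d' (List.mem_cons_of_mem _ hd'))
      (fun d' hd' => hknd d' (List.mem_cons_of_mem _ hd'))
      hfresh' hcfresh'
    rw [← hstpair] at this
    rw [this, hitems]
    unfold pvRank
    rw [List.append_assoc]

-- ---- assembly ----
theorem pv_main (data : List (String × Int)) (hpre : (data.map Prod.fst).Nodup) :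
    generate_step_within_device data = generate_step_within_device_alt data := by
  have hdids_nodup : (pvDids data).Nodup := PySem.Set.nodup_ofList _
  have hdid_grp : ∀ d, ∀ kv ∈ pvGrp data d, pvDid kv.1 = d := by
    intro d kv hkv
    have := List.mem_filter.mp hkv
    simpa using this.2
  have hknd : ∀ d, ((pvGrp data d).map Prod.fst).Nodup := by
    intro d
    exact hpre.sublist (List.filter_sublist.map Prod.fst)
  have hmem_grp : ∀ d, ∀ kv ∈ pvGrp data d, kv ∈ data := fun d kv hkv => (List.mem_filter.mp hkv).1
  -- A side
  have hA : generate_step_within_device data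
      = (((pvDids data).map (fun d => pvRank (pvSortVal (pvGrp data d)))).flatten) := by
    have e0 : generate_step_within_device data
        = (((data.foldl (fun g kv => g.modify (pvDid kv.1) [] (fun xs => xs ++ [kv]))
              PySem.Dict.empty).items).foldl
            (fun acc p =>
              (PySem.List.enumerate (PySem.List.sorted p.2 (fun x => x.2) false) 0).foldl
                (fun acc q => acc.insert q.2.1 q.1) acc)
            PySem.Dict.empty).items := rfl
    rw [e0, pv_grouped_items]
    have := pv_A_outer (pvGrp data) (pvDids data) PySem.Dict.empty hdids_nodup
      (fun d _ => hdid_grp d) (fun d _ => hknd d)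
      (fun d _ kv _ => PySem.Dict.contains_empty kv.1)
    simpa [PySem.Dict.empty] using this
  -- B side
  have hfirst : data.foldl
      (fun f kv =>
        let d := pvDid kv.1
        if f.contains d then f else f.insert d (f.size : Int))
      PySem.Dict.empty
      = pvMkFirst (pvDids data) := by
    have h0 : (PySem.Dict.empty : PySem.Dict String Int) = pvMkFirst [] := rfl
    rw [h0, pv_first_fold]
    rfl
  have hsorted : PySem.List.sorted2 data
      (fun kv => (pvMkFirst (pvDids data)).getD (pvDid kv.1) 0) (fun kv => kv.2) false
      = pvCanon (pvDids data) data := by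
    apply pv_sorted2_canon (pvDids data) _ hdids_nodup data
    · intro x hx
      exact (PySem.Set.mem_ofList _ _).mpr (List.mem_map.mpr ⟨x, hx, rfl⟩)
    · intro x hx
      exact pv_getD_mkFirst (pvDids data) (pvDid x.1) hdids_nodup
        ((PySem.Set.mem_ofList _ _).mpr (List.mem_map.mpr ⟨x, hx, rfl⟩))
  have hcanon : pvCanon (pvDids data) data
      = ((pvDids data).map (fun d => pvSortVal (pvGrp data d))).flatten := by
    unfold pvCanon
    congr 2
    apply List.filter_eq_self.mpr
    intro d hd
    simp only [decide_eq_true_eq]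
    exact (PySem.Set.mem_ofList _ _).mp hd
  have hB : generate_step_within_device_alt data
      = (((pvDids data).map (fun d => pvRank (pvSortVal (pvGrp data d)))).flatten) := by
    have e1 : generate_step_within_device_alt data
        = ((PySem.List.sorted2 data
            (fun kv => (data.foldl
                (fun f kv =>
                  let d := pvDid kv.1
                  if f.contains d then f else f.insert d (f.size : Int))
                PySem.Dict.empty).getD (pvDid kv.1) 0)
            (fun kv => kv.2) false).foldl
          (fun st kv =>
            ((st.1.insert kv.1 (st.2.getD (pvDid kv.1) 0) : PySem.Dict String Int),
             (st.2.insert (pvDid kv.1) (st.2.getD (pvDid kv.1) 0 + 1) : PySem.Dict String Int)))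
          (PySem.Dict.empty, PySem.Dict.empty)).1.items := rfl
    rw [e1, hfirst, hsorted, hcanon]
    have := pv_B_outer (pvGrp data) (pvDids data) PySem.Dict.empty PySem.Dict.empty
      hdids_nodup (fun d _ => hdid_grp d) (fun d _ => hknd d)
      (fun d _ kv _ => PySem.Dict.contains_empty kv.1)
      (fun d _ => PySem.Dict.contains_empty d)
    simpa [PySem.Dict.empty] using this
  rw [hA, hB]

-- ===== VERDICT (by name: the statement is the Claim_ definition above) =====
theorem generate_step_within_device_spec : Claim_equal_generate_step_within_device := by
  intro data _ hpre
  unfold Spec_generate_step_within_device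
  exact pv_main data hpre
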